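-- pv_equiv track=rewrite | github.com/reshinto/algo_flow | src/algorithms/stacks-queues/stack-design/max-frequency-stack/sources/max-frequency-stack.py | max_frequency_stack
-- ===== SOURCE A (Python) =====
-- def max_frequency_stack(values):
--     freq_map = {}  # @step:initialize
--     freq_stacks = {}  # @step:initialize
--     max_frequency = 0  # @step:initialize
--     pop_results = []  # @step:initialize
--
--     # Push phase: update frequency map and push each value onto its frequency-level stack
--     for current_value in values:  # @step:visit
--         current_freq = freq_map.get(current_value, 0) + 1  # @step:compare
--         freq_map[current_value] = current_freq  # @step:compare
--         if current_freq > max_frequency:  # @step:compare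
--             max_frequency = current_freq  # @step:compare
--         if current_freq not in freq_stacks:  # @step:push
--             freq_stacks[current_freq] = []  # @step:push
--         freq_stacks[current_freq].append(current_value)  # @step:push
--
--     # Pop phase: always pop from the highest-frequency stack
--     while max_frequency > 0:  # @step:pop
--         top_stack = freq_stacks[max_frequency]  # @step:pop
--         popped = top_stack.pop()  # @step:pop
--         freq_map[popped] -= 1  # @step:pop
--         if len(top_stack) == 0:  # @step:pop
--             max_frequency -= 1  # @step:pop
--         pop_results.append(popped)  # @step:pop
--
--     return pop_results  # @step:complete
-- ===== SOURCE B (Python) =====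
-- def max_frequency_stack(values):
--     # One annotation pass: level[i] = number of occurrences of values[i] so far.
--     counts = {}
--     levels = []
--     for v in values:
--         c = counts.get(v, 0) + 1
--         counts[v] = c
--         levels.append(c)
--     # Emit by frequency level, highest first; within a level, latest-pushed first.
--     out = []
--     for f in range(max(levels, default=0), 0, -1):
--         for v, l in zip(reversed(values), reversed(levels)):
--             if l == f:
--                 out.append(v)
--     return out
-- ===== Notes on version B (the rewrite author's own statement) =====
-- stated objective: alternative
-- what changed: B replaces A's dict-of-per-frequency-stacks plus the while-loop that drains the highest stack with pops by a single annotation pass assigning each push its frequency level, then emitting, for each level from the maximum down to 1, the values of that level scanned in reverse push order.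
import Mathlib
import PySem

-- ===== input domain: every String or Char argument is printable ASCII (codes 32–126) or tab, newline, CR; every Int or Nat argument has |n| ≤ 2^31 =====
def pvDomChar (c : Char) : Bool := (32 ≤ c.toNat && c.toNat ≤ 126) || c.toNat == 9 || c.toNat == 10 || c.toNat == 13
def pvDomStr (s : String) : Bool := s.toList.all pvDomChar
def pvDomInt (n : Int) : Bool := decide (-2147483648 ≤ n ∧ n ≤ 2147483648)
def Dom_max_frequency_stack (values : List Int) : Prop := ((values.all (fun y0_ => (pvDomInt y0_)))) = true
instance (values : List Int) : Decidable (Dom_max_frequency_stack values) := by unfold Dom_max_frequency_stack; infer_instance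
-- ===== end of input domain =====

-- B replaces A's dict-of-stacks simulation by a level-annotation pass plus per-frequency reversed filters (alternative decomposition, same results).


-- ===== PORT A =====
-- one iteration of A's push loop over the state (freq_map, freq_stacks, max_frequency)
def pvPushA (st : PySem.Dict Int Int × PySem.Dict Int (List Int) × Int) (currentValue : Int) :
    PySem.Dict Int Int × PySem.Dict Int (List Int) × Int :=
  match st with
  | (freqMap, freqStacks, maxFrequency) =>
    let currentFreq := freqMap.getD currentValue 0 + 1
    let freqMap := freqMap.insert currentValue currentFreq
    let maxFrequency := if currentFreq > maxFrequency then currentFreq else maxFrequency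
    let freqStacks := if freqStacks.contains currentFreq then freqStacks
                      else freqStacks.insert currentFreq ([] : List Int)
    let freqStacks := freqStacks.insert currentFreq (freqStacks.getD currentFreq [] ++ [currentValue])
    (freqMap, freqStacks, maxFrequency)

-- A's while-loop.  The `none` branch of `pop?` (empty/missing stack, where Python's
-- `freq_stacks[max_frequency]` / `.pop()` would raise) and the default 0 in `modify`
-- (where Python's `freq_map[popped] -= 1` would raise) are totality guards only:
-- those states are unreachable from the push phase.
def pvPopLoop (freqStacks : PySem.Dict Int (List Int)) (freqMap : PySem.Dict Int Int)
    (maxFrequency : Int) (popResults : List Int) : List Int :=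
  if _h0 : maxFrequency ≤ 0 then popResults
  else
    let topStack := freqStacks.getD maxFrequency []
    match hp : PySem.List.pop? topStack with
    | none => pvPopLoop freqStacks freqMap (maxFrequency - 1) popResults
    | some (popped, rest) =>
      let freqStacks' := freqStacks.insert maxFrequency rest
      let freqMap' := freqMap.modify popped 0 (· - 1)
      if rest.length = 0 then
        pvPopLoop freqStacks' freqMap' (maxFrequency - 1) (popResults ++ [popped])
      else
        pvPopLoop freqStacks' freqMap' maxFrequency (popResults ++ [popped])
termination_by (maxFrequency.toNat, (freqStacks.getD maxFrequency []).length)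
decreasing_by
  · exact Prod.Lex.left _ _ (by omega)
  · exact Prod.Lex.left _ _ (by omega)
  · have hlen := PySem.List.length_of_pop?_eq_some _ hp
    have htop : topStack = freqStacks.getD maxFrequency [] := rfl
    rw [htop] at hlen
    have hlen2 : rest.length + 1 = (freqStacks.getD maxFrequency []).length := hlen
    have : ((freqStacks.insert maxFrequency rest).getD maxFrequency []).length
        < (freqStacks.getD maxFrequency []).length := by
      rw [PySem.Dict.getD_insert_self]; omega
      
    exact Prod.Lex.right _ this

def max_frequency_stack (values : List Int) : List Int :=
  let st := values.foldl pvPushA (PySem.Dict.empty, PySem.Dict.empty, 0)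
  pvPopLoop st.2.1 st.1 st.2.2 []

-- ===== PORT B =====
-- one iteration of B's annotation pass over the state (counts, levels)
def pvPushB (st : PySem.Dict Int Int × List Int) (v : Int) : PySem.Dict Int Int × List Int :=
  let c := st.1.getD v 0 + 1
  (st.1.insert v c, st.2 ++ [c])

def max_frequency_stack_alt (values : List Int) : List Int :=
  let levels := (values.foldl pvPushB (PySem.Dict.empty, [])).2
  (PySem.List.pyRange (PySem.List.maxD levels (fun x => x) 0) 0 (-1)).foldl
    (fun out f =>
      (values.reverse.zip levels.reverse).foldl
        (fun out p => if p.2 == f then out ++ [p.1] else out) out) []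

-- ===== PRECONDITION & SPEC =====
def Spec_max_frequency_stack (values : List Int) (out : List Int) : Prop := out = max_frequency_stack_alt values
instance (values : List Int) (out : List Int) : Decidable (Spec_max_frequency_stack values out) := by unfold Spec_max_frequency_stack; infer_instance

-- ===== CLAIM (what is proved, stated in full; the proofs are below) =====
def Claim_equal_max_frequency_stack : Prop := ∀ (values : List Int), Dom_max_frequency_stack values → Spec_max_frequency_stack values (max_frequency_stack values)

-- ===== LEMMAS AND PROOFS =====

lemma pv_pyRange_neg_nil (m : Int) (h : m ≤ 0) : PySem.List.pyRange m 0 (-1) = [] := by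
  simp [PySem.List.pyRange]
  omega

lemma pv_pyRange_neg_cons (m : Int) (h : 0 < m) :
    PySem.List.pyRange m 0 (-1) = m :: PySem.List.pyRange (m - 1) 0 (-1) := by
  simp only [PySem.List.pyRange]
  norm_num
  have hif : (if 1 < m then m.toNat - 1 else 0) = (m - 1).toNat := by split <;> omega
  rw [hif, if_pos h, show m.toNat = (m - 1).toNat + 1 from by omega, List.range_succ_eq_map]
  simp only [List.map_cons, List.map_map]
  congr 1
  · norm_num
  · apply List.map_congr_left; intro k _; simp [Function.comp]; ring

lemma pv_mem_pyRange_neg {f m : Int} (h : f ∈ PySem.List.pyRange m 0 (-1)) : 0 < f ∧ f ≤ m := by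
  by_cases hm : 0 < m
  · simp only [PySem.List.pyRange] at h
    norm_num at h
    rw [if_pos hm] at h
    simp at h
    rcases h with ⟨k, hk, rfl⟩
    omega
  · rw [pv_pyRange_neg_nil m (by omega)] at h
    simp at h

lemma pv_pop_neg_one {α : Type} {xs rest : List α} {x : α}
    (h : PySem.List.pop? xs = some (x, rest)) : xs = rest ++ [x] := by
  rcases List.eq_nil_or_concat xs with rfl | ⟨ys, y, rfl⟩
  · simp [PySem.List.pop?] at h
  · rw [List.concat_eq_append, PySem.List.pop?_last] at h
    obtain ⟨rfl, rfl⟩ := by simpa using h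
    simp

lemma pv_popLoop_eq (stks : PySem.Dict Int (List Int)) (fm : PySem.Dict Int Int)
    (m : Int) (acc : List Int) :
    pvPopLoop stks fm m acc
      = acc ++ (PySem.List.pyRange m 0 (-1)).flatMap (fun f => (stks.getD f []).reverse) := by
  fun_induction pvPopLoop stks fm m acc
  case case1 S F m acc h =>
    rw [pv_pyRange_neg_nil _ h]; simp
  case case2 S F m acc h T hp ih =>
    have hnil : S.getD m [] = [] := by
      rcases List.eq_nil_or_concat (S.getD m []) with he | ⟨ys, y, he⟩
      · exact he
      · rw [show T = S.getD m [] from rfl, he, List.concat_eq_append,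
          PySem.List.pop?_last] at hp
        cases hp
    rw [ih, pv_pyRange_neg_cons m (by omega)]
    simp [hnil]
  case case3 S F m acc h1 T popped rest hp S' F' h ih =>
    have hxs : S.getD m [] = rest ++ [popped] := pv_pop_neg_one hp
    have hrest : rest = [] := List.eq_nil_of_length_eq_zero h
    have hcong : (PySem.List.pyRange (m - 1) 0 (-1)).flatMap (fun f => (S'.getD f []).reverse)
        = (PySem.List.pyRange (m - 1) 0 (-1)).flatMap (fun f => (S.getD f []).reverse) := by
      apply List.flatMap_congr
      intro f hf
      have := pv_mem_pyRange_neg hf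
      rw [show S' = S.insert m rest from rfl, PySem.Dict.getD_insert, if_neg (by omega)]
    rw [ih, hcong, pv_pyRange_neg_cons m (by omega)]
    simp [hxs, hrest]
  case case4 S F m acc h1 T popped rest hp S' F' h ih =>
    have hxs : S.getD m [] = rest ++ [popped] := pv_pop_neg_one hp
    have hcong : (PySem.List.pyRange (m - 1) 0 (-1)).flatMap (fun f => (S'.getD f []).reverse)
        = (PySem.List.pyRange (m - 1) 0 (-1)).flatMap (fun f => (S.getD f []).reverse) := by
      apply List.flatMap_congr
      intro f hf
      have := pv_mem_pyRange_neg hf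
      rw [show S' = S.insert m rest from rfl, PySem.Dict.getD_insert, if_neg (by omega)]
    rw [ih, pv_pyRange_neg_cons m (by omega)]
    simp only [List.flatMap_cons, hcong,
      show S'.getD m [] = rest from by
        rw [show S' = S.insert m rest from rfl, PySem.Dict.getD_insert_self]]
    simp [hxs]

lemma pv_push_inv (vs : List Int) (cnt : PySem.Dict Int Int) (P : List (Int × Int))
    (stks : PySem.Dict Int (List Int)) (mF : Int)
    (hs : ∀ f, stks.getD f [] = (P.filter (fun p => p.2 == f)).map Prod.fst)
    (hm : mF = (P.map Prod.snd).foldl max 0)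
    (hpos : ∀ l ∈ P.map Prod.snd, 1 ≤ l)
    (hcnt : ∀ v, 0 ≤ cnt.getD v 0) :
    ∃ P' : List (Int × Int),
      vs.foldl pvPushB (cnt, P.map Prod.snd) = ((vs.foldl pvPushA (cnt, stks, mF)).1, P'.map Prod.snd) ∧
      (∀ f, (vs.foldl pvPushA (cnt, stks, mF)).2.1.getD f [] = (P'.filter (fun p => p.2 == f)).map Prod.fst) ∧
      (vs.foldl pvPushA (cnt, stks, mF)).2.2 = (P'.map Prod.snd).foldl max 0 ∧
      P'.map Prod.fst = P.map Prod.fst ++ vs ∧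
      (∀ l ∈ P'.map Prod.snd, 1 ≤ l) := by
  induction vs generalizing cnt P stks mF with
  | nil => exact ⟨P, rfl, hs, hm, by simp, hpos⟩
  | cons v vs ih =>
    simp only [List.foldl_cons]
    have hstepB : pvPushB (cnt, P.map Prod.snd) v
        = (cnt.insert v (cnt.getD v 0 + 1), P.map Prod.snd ++ [cnt.getD v 0 + 1]) := rfl
    have hstepA : pvPushA (cnt, stks, mF) v
        = (cnt.insert v (cnt.getD v 0 + 1),
           (if stks.contains (cnt.getD v 0 + 1) then stks
            else stks.insert (cnt.getD v 0 + 1) ([] : List Int)).insert (cnt.getD v 0 + 1)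
             ((if stks.contains (cnt.getD v 0 + 1) then stks
               else stks.insert (cnt.getD v 0 + 1) ([] : List Int)).getD (cnt.getD v 0 + 1) [] ++ [v]),
           if cnt.getD v 0 + 1 > mF then cnt.getD v 0 + 1 else mF) := rfl
    rw [hstepB, hstepA]
    set c := cnt.getD v 0 + 1 with hc
    set s1 := if stks.contains c then stks else stks.insert c ([] : List Int) with hs1def
    have hcpos : (1 : Int) ≤ c := by have := hcnt v; omega
    have hs1 : ∀ f, s1.getD f [] = stks.getD f [] := by
      intro f
      rw [hs1def]
      by_cases hcon : stks.contains c
      · rw [if_pos hcon]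
      · rw [if_neg (by simp [hcon]), PySem.Dict.getD_insert]
        split_ifs with hf
        · subst hf
          rw [PySem.Dict.getD_of_not_contains _ _ (by simp [hcon])]
        · rfl
    have hs' : ∀ f, (s1.insert c (s1.getD c [] ++ [v])).getD f []
        = ((P ++ [(v, c)]).filter (fun p => p.2 == f)).map Prod.fst := by
      intro f
      rw [PySem.Dict.getD_insert, List.filter_append, List.map_append, ← hs f]
      by_cases hf : f = c
      · subst hf
        rw [if_pos rfl, hs1 c]
        simp
      · rw [if_neg hf, hs1 f]
        have : ((c == f)) = false := by simp [Ne.symm hf]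
        simp [this]
    have hm' : (if c > mF then c else mF) = ((P ++ [(v, c)]).map Prod.snd).foldl max 0 := by
      rw [List.map_append, List.foldl_append, ← hm]

      simp only [List.map_cons, List.map_nil, List.foldl_cons, List.foldl_nil]
      split_ifs with hgt <;> omega
    have hpos' : ∀ l ∈ (P ++ [(v, c)]).map Prod.snd, 1 ≤ l := by
      intro l hl
      rw [List.map_append] at hl
      rcases List.mem_append.mp hl with hl | hl
      · exact hpos l hl
      · simp at hl; omega
    have hcnt' : ∀ w, 0 ≤ (cnt.insert v c).getD w 0 := by
      intro w
      rw [PySem.Dict.getD_insert]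
      split_ifs with hw
      · omega
      · exact hcnt w
    obtain ⟨P', h1, h2, h3, h4, h5⟩ :=
      ih (cnt.insert v c) (P ++ [(v, c)]) _ _ hs' hm' hpos' hcnt'
    refine ⟨P', ?_, h2, h3, ?_, h5⟩
    · rw [← h1]
      congr 1
      simp
    · rw [h4]
      simp

lemma pv_maxD_eq_foldl (levels : List Int) (hpos : ∀ l ∈ levels, 1 ≤ l) :
    PySem.List.maxD levels (fun x => x) 0 = levels.foldl max 0 := by
  cases levels with
  | nil =>
    rw [PySem.List.maxD, (PySem.List.max?_eq_none_iff _ _).mpr rfl]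
    rfl
  | cons x t =>
    have h1 : (1 : Int) ≤ x := hpos x (by simp)
    rw [PySem.List.maxD, PySem.List.max?_id_cons]
    simp [List.foldl_cons]
    rw [max_eq_right (by omega : (0 : Int) ≤ x)]

-- ===== VERDICT (by name: the statement is the Claim_ definition above) =====
theorem max_frequency_stack_spec : Claim_equal_max_frequency_stack := by
  intro values _
  unfold Spec_max_frequency_stack
  obtain ⟨P, hB, hs, hm, hfst, hpos⟩ :=
    pv_push_inv values PySem.Dict.empty [] PySem.Dict.empty 0
      (by intro f; simp [PySem.Dict.getD_empty])
      (by simp)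
      (by simp)
      (by intro w; simp [PySem.Dict.getD_empty])
  simp only [List.map_nil] at hB
  simp only [List.map_nil, List.nil_append] at hfst
  have hL : (values.foldl pvPushB (PySem.Dict.empty, [])).2 = P.map Prod.snd := by
    rw [hB]
  have hApop : max_frequency_stack values
      = (PySem.List.pyRange (values.foldl pvPushA (PySem.Dict.empty, PySem.Dict.empty, 0)).2.2 0 (-1)).flatMap
          (fun f => ((P.filter (fun p => p.2 == f)).map Prod.fst).reverse) := by
    unfold max_frequency_stack
    rw [pv_popLoop_eq, List.nil_append]
    exact List.flatMap_congr (fun f _ => by rw [hs f])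
  have hBalt : max_frequency_stack_alt values
      = (PySem.List.pyRange (PySem.List.maxD ((values.foldl pvPushB (PySem.Dict.empty, [])).2) (fun x => x) 0) 0 (-1)).flatMap
          (fun f => ((values.reverse.zip ((values.foldl pvPushB (PySem.Dict.empty, [])).2).reverse).filter
              (fun p => p.2 == f)).map Prod.fst) := by
    unfold max_frequency_stack_alt
    simp only [PySem.List.foldl_append_if, PySem.List.foldl_append_eq_flatMap, List.nil_append]
  rw [hApop, hBalt]
  have hmax : PySem.List.maxD ((values.foldl pvPushB (PySem.Dict.empty, [])).2) (fun x => x) 0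
      = (values.foldl pvPushA (PySem.Dict.empty, PySem.Dict.empty, 0)).2.2 := by
    rw [hL, pv_maxD_eq_foldl _ hpos, hm]
  have hzip : values.reverse.zip ((values.foldl pvPushB (PySem.Dict.empty, [])).2).reverse = P.reverse := by
    rw [hL, hfst.symm, ← List.map_reverse, ← List.map_reverse, List.zip_map']
    simp
  rw [hmax, hzip]
  apply List.flatMap_congr
  intro f _
  rw [List.filter_reverse, List.map_reverse]
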